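-- pv_equiv track=rewrite | github.com/astolfo-bean-plush/Projects | add_1.py | funnel
-- ===== SOURCE A (Python) =====
-- def funnel(str1, str2):
--     str2_lst = list(str2)
--     for i in range(0, len(str1)):
--         str1_lst = list(str1)
--         del str1_lst[i]
--         if str1_lst == str2_lst:
--             return True
--     return False
-- ===== SOURCE B (Python) =====
-- def funnel(str1, str2):
--     # single pass: lengths must differ by exactly one; skip the first mismatch
--     if len(str1) != len(str2) + 1:
--         return False
--     i = 0
--     while i < len(str2) and str1[i] == str2[i]:
--         i += 1
--     return str1[i + 1:] == str2[i:]
-- ===== Notes on version B (the rewrite author's own statement) =====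
-- stated objective: faster
-- what changed: Replaces the loop that rebuilds and compares a full copy of str1 with each index deleted (O(n^2)) by a single pass: a length check, skipping the common prefix to the first mismatch, then one suffix comparison.
import Mathlib
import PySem

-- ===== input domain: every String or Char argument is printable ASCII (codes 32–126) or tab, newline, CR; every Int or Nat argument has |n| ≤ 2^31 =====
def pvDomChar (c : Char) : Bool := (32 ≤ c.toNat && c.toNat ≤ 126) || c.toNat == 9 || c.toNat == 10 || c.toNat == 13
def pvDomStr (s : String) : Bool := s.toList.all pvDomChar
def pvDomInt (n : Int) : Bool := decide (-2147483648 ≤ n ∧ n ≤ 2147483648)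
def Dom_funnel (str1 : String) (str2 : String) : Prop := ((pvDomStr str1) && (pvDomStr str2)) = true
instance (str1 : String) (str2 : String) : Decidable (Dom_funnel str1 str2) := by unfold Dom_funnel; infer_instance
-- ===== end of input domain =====

-- B replaces A's quadratic delete-and-compare loop by a linear length check + first-mismatch skip + one suffix comparison.


-- ===== PORT A =====
-- the 'for i in range(0, len(str1))' loop with early return
def funnelLoop (s1 s2 : List Char) (i : Nat) : Bool :=
  if h : i < s1.length then
    if s1.eraseIdx i == s2 then true else funnelLoop s1 s2 (i + 1)
  else false
termination_by s1.length - i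

def funnel (str1 : String) (str2 : String) : Bool :=
  funnelLoop str1.toList str2.toList 0

-- ===== PORT B =====
-- the while loop advancing past the common prefix, then the final suffix comparison
def funnelSkip : List Char → List Char → Bool
  | x :: t1, y :: t2 => if x = y then funnelSkip t1 t2 else t1 == y :: t2
  | _ :: t1, [] => t1 == ([] : List Char)
  | [], _ => false

def funnel_alt (str1 : String) (str2 : String) : Bool :=
  if str1.toList.length = str2.toList.length + 1 then
    funnelSkip str1.toList str2.toList
  else false

-- ===== PRECONDITION & SPEC =====
def Spec_funnel (str1 : String) (str2 : String) (out : Bool) : Prop := out = funnel_alt str1 str2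
instance (str1 : String) (str2 : String) (out : Bool) : Decidable (Spec_funnel str1 str2 out) := by unfold Spec_funnel; infer_instance

-- ===== CLAIM (what is proved, stated in full; the proofs are below) =====
def Claim_equal_funnel : Prop := ∀ (str1 : String) (str2 : String), Dom_funnel str1 str2 → Spec_funnel str1 str2 (funnel str1 str2)

-- ===== LEMMAS AND PROOFS =====

theorem funnelLoop_iff (s1 s2 : List Char) (i : Nat) :
    funnelLoop s1 s2 i = true ↔ ∃ j, i ≤ j ∧ j < s1.length ∧ s1.eraseIdx j = s2 := by
  generalize hn : s1.length - i = n
  induction n generalizing i with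
  | zero =>
    rw [funnelLoop]
    have hi : ¬ i < s1.length := by omega
    simp only [hi, dite_false]
    constructor
    · intro h; exact absurd h (by simp)
    · rintro ⟨j, hij, hj, _⟩; omega
  | succ n ih =>
    rw [funnelLoop]
    have hi : i < s1.length := by omega
    simp only [hi, dite_true]
    by_cases he : s1.eraseIdx i = s2
    · have : (s1.eraseIdx i == s2) = true := by simpa using he
      rw [this, if_pos rfl]
      exact ⟨fun _ => ⟨i, le_refl _, hi, he⟩, fun _ => rfl⟩
    · have hbe : (s1.eraseIdx i == s2) = false := by simpa using he
      rw [hbe, if_neg (by simp)]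
      rw [ih (i + 1) (by omega)]
      constructor
      · rintro ⟨j, hij, hj, hje⟩; exact ⟨j, by omega, hj, hje⟩
      · rintro ⟨j, hij, hj, hje⟩
        refine ⟨j, ?_, hj, hje⟩
        rcases Nat.eq_or_lt_of_le hij with rfl | h
        · exact absurd hje he
        · omega

theorem funnelSkip_iff (s1 : List Char) : ∀ (s2 : List Char),
    s1.length = s2.length + 1 →
    (funnelSkip s1 s2 = true ↔ ∃ j, j < s1.length ∧ s1.eraseIdx j = s2) := by
  induction s1 with
  | nil => intro s2 h; simp at h
  | cons x t1 ih =>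
    intro s2 h
    cases s2 with
    | nil =>
      have ht : t1 = [] := by
        have : t1.length = 0 := by simpa using h
        exact List.eq_nil_of_length_eq_zero this
      subst ht
      simp only [funnelSkip]
      constructor
      · intro _; exact ⟨0, by simp, by simp [List.eraseIdx]⟩
      · intro _; simp
    | cons y t2 =>
      simp only [funnelSkip]
      by_cases hxy : x = y
      · subst hxy
        rw [if_pos rfl]
        have hlen : t1.length = t2.length + 1 := by simpa using h
        rw [ih t2 hlen]
        constructor
        · rintro ⟨j, hj, hje⟩
          exact ⟨j + 1, by simpa using Nat.succ_lt_succ hj, by simp [List.eraseIdx_cons_succ, hje]⟩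
        · rintro ⟨j, hj, hje⟩
          cases j with
          | zero =>
            simp only [List.eraseIdx_cons_zero] at hje
            refine ⟨0, by omega, ?_⟩
            rw [hje]; simp [List.eraseIdx]
          | succ k =>
            simp only [List.eraseIdx_cons_succ, List.cons.injEq] at hje
            exact ⟨k, by simp at hj; omega, hje.2⟩
      · rw [if_neg hxy]
        constructor
        · intro hb
          have ht : t1 = y :: t2 := by simpa using hb
          exact ⟨0, by simp, by simp [ht]⟩
        · rintro ⟨j, hj, hje⟩
          cases j with
          | zero =>
            simp only [List.eraseIdx_cons_zero] at hje
            simp [hje]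
          | succ k =>
            simp only [List.eraseIdx_cons_succ, List.cons.injEq] at hje
            exact absurd hje.1 hxy

-- ===== VERDICT (by name: the statement is the Claim_ definition above) =====
theorem funnel_spec : Claim_equal_funnel := by
  intro str1 str2 _
  unfold Spec_funnel funnel funnel_alt
  rw [Bool.eq_iff_iff, funnelLoop_iff]
  by_cases h : str1.toList.length = str2.toList.length + 1
  · rw [if_pos h, funnelSkip_iff _ _ h]
    constructor
    · rintro ⟨j, _, hj, hje⟩; exact ⟨j, hj, hje⟩
    · rintro ⟨j, hj, hje⟩; exact ⟨j, Nat.zero_le _, hj, hje⟩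
  · rw [if_neg h]
    constructor
    · rintro ⟨j, _, hj, hje⟩
      exfalso; apply h
      have h1 := List.length_eraseIdx (l := str1.toList) (i := j)
      rw [if_pos hj, hje] at h1
      omega
    · intro hb; exact absurd hb (by simp)
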